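-- pv_equiv track=rewrite | github.com/LaMassa07/Line-Coding | try.py | mlt3
-- ===== SOURCE A (Python) =====
-- bit_time = 1
--
-- def seq(v, prev):
--     if abs(v) == 1:
--         return 0
--     else:
--         if prev == 1:
--             return -1
--         else:
--             return 1
--
-- def mlt3(bits):
--     t = []
--     y = []
--     v = 0
--     prev = -1
--     mem = prev
--     for i, b in enumerate(bits):
--         t.append(i*bit_time)
--         mem = v
--         if b == 1:
--             v = seq(v, prev)
--             prev = mem
--         y.append(v)
--     t.append(len(bits)*bit_time)
--     y.append(v)
--
--     return t, y
-- ===== SOURCE B (Python) =====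
-- bit_time = 1
--
-- LEVELS = [0, 1, 0, -1]
--
-- def mlt3(bits):
--     t = [i * bit_time for i in range(len(bits) + 1)]
--     y = []
--     ones = 0
--     for b in bits:
--         if b == 1:
--             ones += 1
--         y.append(LEVELS[ones % 4])
--     y.append(LEVELS[ones % 4])
--     return t, y
-- ===== Notes on version B (the rewrite author's own statement) =====
-- stated objective: idiomatic
-- what changed: Drops the v/prev/mem state machine and the seq transition helper: the time axis is built as one range comprehension and each output level is read off a four-entry table indexed by the running count of ones modulo 4.
import Mathlib
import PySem

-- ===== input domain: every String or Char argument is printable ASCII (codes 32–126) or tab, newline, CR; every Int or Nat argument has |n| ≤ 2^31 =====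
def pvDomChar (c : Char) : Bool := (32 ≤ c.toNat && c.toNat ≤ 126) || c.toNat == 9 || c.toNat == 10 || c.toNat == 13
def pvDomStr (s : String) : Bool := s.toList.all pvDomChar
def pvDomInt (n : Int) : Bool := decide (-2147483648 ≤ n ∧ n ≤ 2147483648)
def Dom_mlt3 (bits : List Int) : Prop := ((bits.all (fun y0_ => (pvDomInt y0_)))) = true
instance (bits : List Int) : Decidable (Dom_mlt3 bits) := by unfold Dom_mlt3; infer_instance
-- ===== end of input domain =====

-- B drops A's v/prev/mem state machine and seq helper: t is one range comprehension, and
-- each level is a table lookup indexed by the running count of ones mod 4 (idiomatic; same O(n)).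

-- ===== PORT A =====
def bitTime : Int := 1

def seqA (v prev : Int) : Int :=
  if |v| = 1 then 0
  else if prev = 1 then -1 else 1

-- loop over enumerate(bits) with state (i, v, prev, mem); trailing appends are the base case
def mlt3Loop (bits : List Int) (i v prev mem : Int) : List Int × List Int :=
  match bits with
  | [] => ([i * bitTime], [v])
  | b :: rest =>
      let mem' := v
      let v' := if b = 1 then seqA v prev else v
      let prev' := if b = 1 then mem' else prev
      let r := mlt3Loop rest (i + 1) v' prev' mem'
      (i * bitTime :: r.1, v' :: r.2)

def mlt3 (bits : List Int) : List Int × List Int :=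
  mlt3Loop bits 0 0 (-1) (-1)

-- ===== PORT B =====
def LEVELS : List Int := [0, 1, 0, -1]

-- the y pass: running count of ones; the trailing append is the base case
def yLoop (bits : List Int) (ones : Nat) : List Int :=
  match bits with
  | [] => [LEVELS.getD (ones % 4) 0]
  | b :: rest =>
      let o := if b = 1 then ones + 1 else ones
      LEVELS.getD (o % 4) 0 :: yLoop rest o

def mlt3_alt (bits : List Int) : List Int × List Int :=
  ((PySem.List.pyRange 0 ((bits.length : Int) + 1) 1).map (fun i => i * bitTime),
   yLoop bits 0)

-- ===== PRECONDITION & SPEC =====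
def Spec_mlt3 (bits : List Int) (out : List Int × List Int) : Prop := out = mlt3_alt bits
instance (bits : List Int) (out : List Int × List Int) : Decidable (Spec_mlt3 bits out) := by unfold Spec_mlt3; infer_instance

-- ===== CLAIM (what is proved, stated in full; the proofs are below) =====
def Claim_equal_mlt3 : Prop := ∀ (bits : List Int), Dom_mlt3 bits → Spec_mlt3 bits (mlt3 bits)

-- ===== LEMMAS AND PROOFS =====

-- A's transition agrees with B's table step, under the invariant below.
theorem seqA_table (c : Nat) :
    seqA (LEVELS.getD (c % 4) 0) (LEVELS.getD ((c + 3) % 4) 0)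
      = LEVELS.getD ((c + 1) % 4) 0 := by
  have h : c % 4 = 0 ∨ c % 4 = 1 ∨ c % 4 = 2 ∨ c % 4 = 3 := by omega
  have h1 : (c + 1) % 4 = (c % 4 + 1) % 4 := by omega
  have h3 : (c + 3) % 4 = (c % 4 + 3) % 4 := by omega
  rcases h with h | h | h | h <;> rw [h1, h3, h] <;> decide

-- Invariant: A's (v, prev) is (LEVELS[c%4], LEVELS[(c+3)%4]) for B's count c of ones so far;
-- mem is dead state, and A's t-list from index i is the range i..i+len(bits).
theorem mlt3Loop_eq (bits : List Int) :
    ∀ (i mem : Int) (c : Nat),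
      mlt3Loop bits i (LEVELS.getD (c % 4) 0) (LEVELS.getD ((c + 3) % 4) 0) mem
        = ((PySem.List.pyRange i (i + (bits.length : Int) + 1) 1).map (fun j => j * bitTime),
           yLoop bits c) := by
  induction bits with
  | nil =>
      intro i mem c
      have hr : PySem.List.pyRange i (i + (0 : Int) + 1) 1
          = i :: PySem.List.pyRange (i + 1) (i + 0 + 1) 1 :=
        PySem.List.pyRange_one_cons (by omega)
      have hr2 : PySem.List.pyRange (i + 1) (i + 0 + 1) 1 = [] :=
        PySem.List.pyRange_one_eq_nil (by omega)
      simp [mlt3Loop, yLoop, hr, hr2]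
  | cons b rest ih =>
      intro i mem c
      have hr : PySem.List.pyRange i (i + ((b :: rest).length : Int) + 1) 1
          = i :: PySem.List.pyRange (i + 1) (i + (b :: rest).length + 1) 1 :=
        PySem.List.pyRange_one_cons (by simp; omega)
      have hb2 : (i + ((b :: rest).length : Int) + 1) = (i + 1) + (rest.length : Int) + 1 := by
        simp; omega
      by_cases hb : b = 1
      · subst hb
        have hprev : LEVELS.getD (c % 4) 0 = LEVELS.getD ((c + 1 + 3) % 4) 0 := by
          have : (c + 1 + 3) % 4 = c % 4 := by omega
          rw [this]
        simp only [mlt3Loop, yLoop, if_true, seqA_table]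
        rw [hprev, ih (i + 1) (LEVELS.getD ((c + 1 + 3) % 4) 0) (c + 1), hr, hb2]
        simp [yLoop]
      · simp only [mlt3Loop, yLoop, if_neg hb]
        rw [ih (i + 1) (LEVELS.getD (c % 4) 0) c, hr, hb2]
        simp

-- ===== VERDICT (by name: the statement is the Claim_ definition above) =====
theorem mlt3_spec : Claim_equal_mlt3 := by
  intro bits _
  show mlt3 bits = mlt3_alt bits
  have h := mlt3Loop_eq bits 0 (-1) 0
  simpa [mlt3, mlt3_alt, LEVELS, add_comm] using h
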